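-- pv_equiv track=rewrite | github.com/jason-c-kwan/autovid | core/slide_sync.py | _group_narration_by_slide
-- ===== SOURCE A (Python) =====
-- from typing import Dict, List, Optional, Tuple, Any
--
-- def _group_narration_by_slide(narration_segments: List[Dict[str, Any]]) -> Dict[int, List[Dict]]:
--     """Group narration segments by slide number with validation."""
--     slide_groups = {}
--
--     for i, segment in enumerate(narration_segments):
--         slide_num = segment.get('slide_number', i + 1)  # Fallback to sequential numbering
--
--         if slide_num not in slide_groups:
--             slide_groups[slide_num] = []
--         slide_groups[slide_num].append(segment)
--
--     return slide_groups
-- ===== SOURCE B (Python) =====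
-- def _group_narration_by_slide(narration_segments):
--     """Group narration segments by slide number with validation."""
--     keyed = [(seg.get('slide_number', i + 1), seg)
--              for i, seg in enumerate(narration_segments)]
--     return {k: [seg for kk, seg in keyed if kk == k]
--             for k in dict.fromkeys(k for k, _ in keyed)}
-- ===== Notes on version B (the rewrite author's own statement) =====
-- stated objective: simpler
-- what changed: Replaces the single-pass mutable-dict accumulation (conditional empty-list insert then append) with a two-phase comprehension: compute all (key, segment) pairs once via enumerate, dedup the keys in first-occurrence order with dict.fromkeys, and build each group by filtering the keyed list.
import Mathlib
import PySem

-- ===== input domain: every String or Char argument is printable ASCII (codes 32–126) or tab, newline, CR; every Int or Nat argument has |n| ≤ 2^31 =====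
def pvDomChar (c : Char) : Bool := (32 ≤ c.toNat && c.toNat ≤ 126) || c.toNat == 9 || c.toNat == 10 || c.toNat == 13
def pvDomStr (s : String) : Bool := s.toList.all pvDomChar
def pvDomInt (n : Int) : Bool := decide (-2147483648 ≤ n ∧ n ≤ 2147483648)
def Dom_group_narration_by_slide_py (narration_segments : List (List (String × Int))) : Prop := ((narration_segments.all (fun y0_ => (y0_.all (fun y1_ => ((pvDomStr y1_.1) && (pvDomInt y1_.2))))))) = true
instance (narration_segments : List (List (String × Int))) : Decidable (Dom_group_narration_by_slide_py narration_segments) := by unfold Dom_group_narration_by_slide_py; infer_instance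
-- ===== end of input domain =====

-- ===== PORT A =====
-- A: one pass over enumerate(narration_segments); conditional empty-list insert, then append.
def group_narration_by_slide_py (narration_segments : List (List (String × Int))) : List (Int × List (List (String × Int))) :=
  (((PySem.List.enumerate narration_segments).foldl
      (fun (slide_groups : PySem.Dict Int (List (List (String × Int)))) p =>
        let slide_num := PySem.Dict.getD (PySem.Dict.mk p.2) "slide_number" (p.1 + 1)
        let slide_groups :=
          if slide_groups.contains slide_num then slide_groups
          else slide_groups.insert slide_num []
        slide_groups.insert slide_num (slide_groups.getD slide_num [] ++ [p.2]))
      PySem.Dict.empty)).items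

-- ===== PORT B =====
-- B (simpler decomposition): keyed pairs once, ordered key dedup, one filter per key.
def group_narration_by_slide_py_alt (narration_segments : List (List (String × Int))) : List (Int × List (List (String × Int))) :=
  let keyed := (PySem.List.enumerate narration_segments).map
    (fun p => (PySem.Dict.getD (PySem.Dict.mk p.2) "slide_number" (p.1 + 1), p.2))
  (PySem.List.dedup (keyed.map Prod.fst)).map
    (fun k => (k, (keyed.filter (fun q => q.1 == k)).map Prod.snd))

-- ===== PRECONDITION & SPEC =====
def Spec_group_narration_by_slide_py (narration_segments : List (List (String × Int))) (out : List (Int × List (List (String × Int)))) : Prop := out = group_narration_by_slide_py_alt narration_segments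
instance (narration_segments : List (List (String × Int))) (out : List (Int × List (List (String × Int)))) : Decidable (Spec_group_narration_by_slide_py narration_segments out) := by unfold Spec_group_narration_by_slide_py; infer_instance

-- ===== CLAIM (what is proved, stated in full; the proofs are below) =====
def Claim_equal_group_narration_by_slide_py : Prop := ∀ (narration_segments : List (List (String × Int))), Dom_group_narration_by_slide_py narration_segments → Spec_group_narration_by_slide_py narration_segments (group_narration_by_slide_py narration_segments)

-- ===== LEMMAS AND PROOFS =====

-- A's per-segment step (conditional empty insert, then append) is exactly Dict.modify.
theorem step_eq_modify (d : PySem.Dict Int (List (List (String × Int)))) (k : Int)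
    (s : List (String × Int)) :
    (let d' := if d.contains k then d else d.insert k []
     d'.insert k (d'.getD k [] ++ [s])) = d.modify k [] (fun l => l ++ [s]) := by
  by_cases h : d.contains k = true
  · simp [h, PySem.Dict.modify]
  · simp only [Bool.not_eq_true] at h
    simp [h, PySem.Dict.modify, PySem.Dict.insert_insert_self,
      PySem.Dict.getD_insert_self, PySem.Dict.getD_of_not_contains d [] h]

-- The whole of A is B: keys of the modify-loop are the ordered dedup of the keys,
-- and each value is the filtered segments (getD_foldl_modify_append).
theorem ports_agree (narration_segments : List (List (String × Int))) :
    group_narration_by_slide_py narration_segments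
      = group_narration_by_slide_py_alt narration_segments := by
  unfold group_narration_by_slide_py group_narration_by_slide_py_alt
  set L := (PySem.List.enumerate narration_segments).map
    (fun p => (PySem.Dict.getD (PySem.Dict.mk p.2) "slide_number" (p.1 + 1), p.2)) with hL
  have hfold :
      (PySem.List.enumerate narration_segments).foldl
        (fun (slide_groups : PySem.Dict Int (List (List (String × Int)))) p =>
          let slide_num := PySem.Dict.getD (PySem.Dict.mk p.2) "slide_number" (p.1 + 1)
          let slide_groups :=
            if slide_groups.contains slide_num then slide_groups
            else slide_groups.insert slide_num []
          slide_groups.insert slide_num (slide_groups.getD slide_num [] ++ [p.2]))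
        PySem.Dict.empty
      = L.foldl (fun d p => d.modify p.1 [] (fun l => l ++ [p.2])) PySem.Dict.empty := by
    rw [hL, List.foldl_map]
    congr 1
    funext d p
    exact step_eq_modify d _ p.2
  rw [hfold]
  have hkeys :
      (L.foldl (fun d p => d.modify p.1 [] (fun l => l ++ [p.2])) PySem.Dict.empty).keys
        = PySem.List.dedup (L.map Prod.fst) := by
    rw [show (fun (d : PySem.Dict Int (List (List (String × Int)))) (p : Int × List (String × Int)) => d.modify p.1 [] (fun l => l ++ [p.2]))
          = (fun d p => d.modify (Prod.fst p) [] ((fun (d : PySem.Dict Int (List (List (String × Int)))) (p : Int × List (String × Int)) (l : List (List (String × Int))) => l ++ [p.2]) d p)) from rfl,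
        PySem.Dict.keys_foldl_modify_key, PySem.Dict.keys_empty, PySem.Set.update_nil_left]
    rfl
  have hnd : (L.foldl (fun d p => d.modify p.1 [] (fun l => l ++ [p.2])) PySem.Dict.empty).keys.Nodup := by
    rw [hkeys]
    exact PySem.Set.nodup_ofList _
  rw [PySem.Dict.items_eq_map_keys _ hnd [], hkeys]
  refine List.map_congr_left (fun k _ => ?_)
  rw [PySem.Dict.getD_foldl_modify_append L PySem.Dict.empty k]
  simp [PySem.Dict.getD_empty]

-- ===== VERDICT (by name: the statement is the Claim_ definition above) =====
theorem group_narration_by_slide_py_spec : Claim_equal_group_narration_by_slide_py := by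
  intro ns _
  unfold Spec_group_narration_by_slide_py
  exact ports_agree ns
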